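-- pv_equiv track=rewrite | github.com/jgontrum/uu-lt-programming-i | assignment5/w4funs.py | caplist
-- ===== SOURCE A (Python) =====
-- def caplist(s):
--     """
--     Creates a list of all capitalized suffixes of a string.
--     :param s: A string.
--     :returns: A list of a all possible capitalized suffixes.
--     """
--     ret = []
--     for i in range(len(s)):
--         prefix = s[:i]
--         for a in s[i:]:
--             prefix += a.upper()
--         ret.append(prefix)
--     return ret[::-1]
-- ===== SOURCE B (Python) =====
-- def caplist(s):
--     chars = list(s)
--     out = []
--     for i in range(len(s) - 1, -1, -1):
--         chars[i] = chars[i].upper()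
--         out.append(''.join(chars))
--     return out
-- ===== Notes on version B (the rewrite author's own statement) =====
-- stated objective: alternative
-- what changed: Instead of rebuilding each suffix-uppercased string independently from slices and reversing the list at the end, B maintains one mutable char buffer and walks indices back-to-front, uppercasing a single character per step and emitting the joined buffer, producing the reversed order directly.
import Mathlib
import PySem

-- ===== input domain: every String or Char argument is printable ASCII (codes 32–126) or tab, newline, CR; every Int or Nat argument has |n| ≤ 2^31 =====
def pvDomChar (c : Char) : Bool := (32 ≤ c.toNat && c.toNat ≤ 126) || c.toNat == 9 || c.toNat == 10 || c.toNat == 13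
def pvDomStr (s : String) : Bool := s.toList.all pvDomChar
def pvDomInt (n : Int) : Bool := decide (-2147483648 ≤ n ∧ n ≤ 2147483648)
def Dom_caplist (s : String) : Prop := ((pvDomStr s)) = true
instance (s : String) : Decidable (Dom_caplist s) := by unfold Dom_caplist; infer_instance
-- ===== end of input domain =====

-- B keeps one mutable char buffer and walks indices back-to-front, uppercasing one
-- character per step, instead of rebuilding each string from slices and reversing the list.

-- ===== PORT A =====
-- A: ret = []; for i in range(len(s)): prefix = s[:i]; for a in s[i:]: prefix += a.upper(); ret.append(prefix); return ret[::-1]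
def caplist (s : String) : List String :=
  let cs := s.toList
  let ret := (List.range cs.length).foldl (fun (ret : List String) (i : Nat) =>
    let pre := PySem.List.slice cs none (some (i : Int))            -- s[:i]
    let pre := (PySem.List.slice cs (some (i : Int)) none).foldl    -- for a in s[i:]
      (fun p a => p ++ [PySem.Chars.upperChar a]) pre                -- prefix += a.upper()
    ret ++ [String.ofList pre]) []
  ret.reverse                                                        -- ret[::-1]

-- ===== PORT B =====
-- B's loop: for i in range(len(s)-1, -1, -1): chars[i] = chars[i].upper(); out.append(''.join(chars))
def caplistAltGo : List Char → Nat → List String → List String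
  | _, 0, out => out
  | chars, Nat.succ i, out =>
    let chars' := chars.set i (PySem.Chars.upperChar chars[i]!)
    caplistAltGo chars' i (out ++ [String.ofList chars'])

def caplist_alt (s : String) : List String :=
  caplistAltGo s.toList s.toList.length []

-- ===== PRECONDITION & SPEC =====
def Spec_caplist (s : String) (out : List String) : Prop := out = caplist_alt s
instance (s : String) (out : List String) : Decidable (Spec_caplist s out) := by unfold Spec_caplist; infer_instance

-- ===== CLAIM (what is proved, stated in full; the proofs are below) =====
def Claim_equal_caplist : Prop := ∀ (s : String), Dom_caplist s → Spec_caplist s (caplist s)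

-- ===== LEMMAS AND PROOFS =====

-- the buffer B holds after having processed all indices ≥ i
def pvBuf (cs : List Char) (i : Nat) : List Char :=
  cs.take i ++ (cs.drop i).map PySem.Chars.upperChar

theorem foldl_push {α β : Type} (f : α → β) (l : List α) (acc : List β) :
    l.foldl (fun r a => r ++ [f a]) acc = acc ++ l.map f := by
  induction l generalizing acc with
  | nil => simp
  | cons x xs ih => simp [List.foldl, ih]

theorem pvBuf_succ (cs : List Char) (i : Nat) (h : i < cs.length) :
    pvBuf cs (i + 1) = cs.take i ++ cs[i] :: (cs.drop (i + 1)).map PySem.Chars.upperChar := by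
  unfold pvBuf
  rw [List.take_add_one]
  simp only [List.getElem?_eq_getElem h, Option.toList_some, List.append_assoc,
    List.singleton_append]

theorem pvBuf_eq_cons (cs : List Char) (i : Nat) (h : i < cs.length) :
    pvBuf cs i = cs.take i ++ PySem.Chars.upperChar cs[i] ::
      (cs.drop (i + 1)).map PySem.Chars.upperChar := by
  unfold pvBuf
  rw [List.drop_eq_getElem_cons h, List.map_cons]

theorem set_append_cons {α : Type} (xs ys : List α) (c v : α) :
    (xs ++ c :: ys).set xs.length v = xs ++ v :: ys := by simp

theorem get!_append_cons (xs ys : List Char) (c : Char) :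
    (xs ++ c :: ys)[xs.length]! = c := by simp

theorem pvBuf_step (cs : List Char) (i : Nat) (h : i < cs.length) :
    (pvBuf cs (i + 1)).set i (PySem.Chars.upperChar (pvBuf cs (i + 1))[i]!) = pvBuf cs i := by
  have hlen : (cs.take i).length = i := by simp; omega
  have hget : (pvBuf cs (i + 1))[i]! = cs[i] := by
    rw [pvBuf_succ cs i h]
    have hg := get!_append_cons (cs.take i)
      ((cs.drop (i + 1)).map PySem.Chars.upperChar) cs[i]
    rwa [hlen] at hg
  rw [hget, pvBuf_succ cs i h, pvBuf_eq_cons cs i h]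
  calc (cs.take i ++ cs[i] :: (cs.drop (i + 1)).map PySem.Chars.upperChar).set i
          (PySem.Chars.upperChar cs[i])
      = (cs.take i ++ cs[i] :: (cs.drop (i + 1)).map PySem.Chars.upperChar).set
          (cs.take i).length (PySem.Chars.upperChar cs[i]) := by rw [hlen]
    _ = cs.take i ++ PySem.Chars.upperChar cs[i] ::
          (cs.drop (i + 1)).map PySem.Chars.upperChar := set_append_cons ..

theorem caplistAltGo_spec (cs : List Char) (i : Nat) (hi : i ≤ cs.length) (out : List String) :
    caplistAltGo (pvBuf cs i) i out =
      out ++ ((List.range i).reverse.map (fun j => String.ofList (pvBuf cs j))) := by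
  induction i generalizing out with
  | zero => simp [caplistAltGo]
  | succ i ih =>
    rw [caplistAltGo]
    rw [pvBuf_step cs i (by omega), ih (by omega)]
    simp [List.range_succ]

theorem caplist_eq (s : String) :
    caplist s = ((List.range s.toList.length).map
      (fun i => String.ofList (pvBuf s.toList i))).reverse := by
  unfold caplist
  simp only [foldl_push, List.nil_append]
  congr 1
  congr 1
  funext i
  rw [PySem.List.slice_to_natCast, PySem.List.slice_from_natCast]
  rfl

theorem caplist_alt_eq (s : String) :
    caplist_alt s = (List.range s.toList.length).reverse.map
      (fun j => String.ofList (pvBuf s.toList j)) := by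
  unfold caplist_alt
  have h0 : pvBuf s.toList s.toList.length = s.toList := by
    simp only [pvBuf, List.take_length, List.drop_length, List.map_nil, List.append_nil]
  have hspec := caplistAltGo_spec s.toList s.toList.length le_rfl []
  rw [h0] at hspec
  rw [hspec, List.nil_append]

-- ===== VERDICT (by name: the statement is the Claim_ definition above) =====
theorem caplist_spec : Claim_equal_caplist := by
  intro s _
  unfold Spec_caplist
  rw [caplist_eq, caplist_alt_eq, List.map_reverse]
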